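-- pv_equiv track=rewrite | github.com/skylerseeg/fieldbridge | backend/app/modules/vendors/service.py | _collect_enrichment_codes
-- ===== SOURCE A (Python) =====
-- def _collect_enrichment_codes(row: dict) -> list[str]:
--     """Non-null, stripped, distinct codes from enrichment e_code_1..e_code_5."""
--     seen: set[str] = set()
--     out: list[str] = []
--     for i in range(1, 6):
--         raw = row.get(f"e_code_{i}")
--         if raw is None:
--             continue
--         code = raw.strip()
--         if not code or code in seen:
--             continue
--         seen.add(code)
--         out.append(code)
--     return out
-- ===== SOURCE B (Python) =====
-- def _collect_enrichment_codes(row: dict) -> list[str]: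
--     """Non-null, stripped, distinct codes from enrichment e_code_1..e_code_5."""
--     def go(i: int) -> list[str]:
--         if i > 5:
--             return []
--         rest = go(i + 1)
--         raw = row.get(f"e_code_{i}")
--         if raw is None:
--             return rest
--         code = raw.strip()
--         if not code:
--             return rest
--         return [code] + [c for c in rest if c != code]
--     return go(1)
-- ===== Notes on version B (the rewrite author's own statement) =====
-- stated objective: alternative
-- what changed: Replaces A's forward loop threading a seen-set and an output list with a recursive back-to-front construction: recurse on index i=5..1 and prepend the current code while removing its later duplicates from the recursive result, so no seen-set or dedup container exists.
import Mathlib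
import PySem

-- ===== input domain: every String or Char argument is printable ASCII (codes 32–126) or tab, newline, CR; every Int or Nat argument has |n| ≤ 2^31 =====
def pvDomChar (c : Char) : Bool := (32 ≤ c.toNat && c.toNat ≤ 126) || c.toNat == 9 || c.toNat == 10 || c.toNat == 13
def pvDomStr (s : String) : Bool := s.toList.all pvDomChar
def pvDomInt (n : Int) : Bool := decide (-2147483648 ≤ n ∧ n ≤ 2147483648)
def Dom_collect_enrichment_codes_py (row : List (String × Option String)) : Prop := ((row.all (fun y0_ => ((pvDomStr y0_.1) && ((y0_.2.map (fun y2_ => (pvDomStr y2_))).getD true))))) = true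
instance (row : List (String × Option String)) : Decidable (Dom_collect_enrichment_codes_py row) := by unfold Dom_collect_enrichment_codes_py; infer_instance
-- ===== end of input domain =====

-- B replaces A's forward seen-set loop by a back-to-front recursion that removes later
-- duplicates when prepending (objective: alternative, same cost at k=5).

-- ===== PORT A =====
-- fused loop: state (seen, out); raw = row.get(f"e_code_{i}")
def collect_enrichment_codes_py (row : List (String × Option String)) : List String :=
  (((PySem.List.pyRange 1 6 1).foldl
    (fun (st : PySem.Set String × List String) i =>
      match ((PySem.Dict.mk row).get? ("e_code_" ++ PySem.Int.toStr i)).getD none with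
      | none => st
      | some raw =>
        let code := PySem.Str.strip raw
        if code = "" || PySem.Set.contains st.1 code then st
        else (PySem.Set.add st.1 code, st.2 ++ [code]))
    (PySem.Set.empty, []))).2

-- ===== PORT B =====
-- go(i): recurse on i+1, then prepend the current code, removing its later duplicates
def pvGoB (row : List (String × Option String)) (i : Int) : List String :=
  if _h : i > 5 then []
  else
    let rest := pvGoB row (i + 1)
    match ((PySem.Dict.mk row).get? ("e_code_" ++ PySem.Int.toStr i)).getD none with
    | none => rest
    | some raw =>
      let code := PySem.Str.strip raw
      if code = "" then rest
      else code :: rest.filter (fun c => !(c == code))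
  termination_by (6 - i).toNat
  decreasing_by omega

def collect_enrichment_codes_py_alt (row : List (String × Option String)) : List String :=
  pvGoB row 1

-- ===== PRECONDITION & SPEC =====
def Spec_collect_enrichment_codes_py (row : List (String × Option String)) (out : List String) : Prop := out = collect_enrichment_codes_py_alt row
instance (row : List (String × Option String)) (out : List String) : Decidable (Spec_collect_enrichment_codes_py row out) := by unfold Spec_collect_enrichment_codes_py; infer_instance

-- ===== CLAIM =====
def Claim_equal_collect_enrichment_codes_py : Prop := ∀ (row : List (String × Option String)), Dom_collect_enrichment_codes_py row → Spec_collect_enrichment_codes_py row (collect_enrichment_codes_py row)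

-- ===== LEMMAS AND PROOFS =====

-- B's recursion, re-expressed over an explicit list of indices (proof helper).
def pvGoL (row : List (String × Option String)) : List Int → List String
  | [] => []
  | i :: t =>
    let rest := pvGoL row t
    match ((PySem.Dict.mk row).get? ("e_code_" ++ PySem.Int.toStr i)).getD none with
    | none => rest
    | some raw =>
      let code := PySem.Str.strip raw
      if code = "" then rest
      else code :: rest.filter (fun c => !(c == code))

theorem pvGoB_eq_goL (row : List (String × Option String)) :
    pvGoB row 1 = pvGoL row [1, 2, 3, 4, 5] := by
  rw [pvGoB, pvGoB, pvGoB, pvGoB, pvGoB, pvGoB]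
  simp [pvGoL]

-- A's loop starting with seen = out = s produces s followed by B's result with the
-- elements of s filtered out.
theorem pv_fold_eq (row : List (String × Option String)) (l : List Int) (s : List String) :
    l.foldl
      (fun (st : PySem.Set String × List String) i =>
        match ((PySem.Dict.mk row).get? ("e_code_" ++ PySem.Int.toStr i)).getD none with
        | none => st
        | some raw =>
          let code := PySem.Str.strip raw
          if code = "" || PySem.Set.contains st.1 code then st
          else (PySem.Set.add st.1 code, st.2 ++ [code]))
      (s, s)
    = (let r := s ++ (pvGoL row l).filter (fun c => !(decide (c ∈ s)))
       (r, r)) := by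
  induction l generalizing s with
  | nil => simp [pvGoL]
  | cons i t ih =>
    simp only [List.foldl_cons, pvGoL]
    cases h : ((PySem.Dict.mk row).get? ("e_code_" ++ PySem.Int.toStr i)).getD none with
    | none => simpa using ih s
    | some raw =>
      by_cases he : PySem.Str.strip raw = ""
      · simpa [he] using ih s
      · by_cases hc : PySem.Str.strip raw ∈ s
        · have hfilt :
              ((pvGoL row t).filter (fun c => !(c == PySem.Str.strip raw))).filter
                (fun c => !(decide (c ∈ s))) =
              (pvGoL row t).filter (fun c => !(decide (c ∈ s))) := by
            rw [List.filter_filter]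
            apply List.filter_congr
            intro x _
            by_cases hxs : x ∈ s
            · simp [hxs]
            · have hxe : ¬ x = PySem.Str.strip raw := fun hxe => hxs (hxe ▸ hc)
              simp [hxs, hxe]
          simpa [he, hc, hfilt] using ih s
        · have hadd : PySem.Set.add s (PySem.Str.strip raw) = s ++ [PySem.Str.strip raw] := by
            simp [PySem.Set.add, hc]
          have hfilt :
              (pvGoL row t).filter (fun c => !(decide (c ∈ s ++ [PySem.Str.strip raw]))) =
              ((pvGoL row t).filter (fun c => !(c == PySem.Str.strip raw))).filter
                (fun c => !(decide (c ∈ s))) := by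
            rw [List.filter_filter]
            apply List.filter_congr
            intro x _
            by_cases hx : x = PySem.Str.strip raw
            · simp [hx]
            · by_cases hxs : x ∈ s <;> simp [hx, hxs]
          have hmain := ih (s ++ [PySem.Str.strip raw])
          rw [hfilt] at hmain
          simpa [he, hc, hadd, List.append_assoc] using hmain

-- ===== VERDICT =====
theorem collect_enrichment_codes_py_spec : Claim_equal_collect_enrichment_codes_py := by
  intro row _
  unfold Spec_collect_enrichment_codes_py collect_enrichment_codes_py collect_enrichment_codes_py_alt
  rw [show (PySem.Set.empty : PySem.Set String) = ([] : List String) from rfl,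
      pv_fold_eq row (PySem.List.pyRange 1 6 1) [], pvGoB_eq_goL]
  simp [show PySem.List.pyRange 1 6 1 = [1,2,3,4,5] from rfl]
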